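-- pv_equiv track=rewrite | github.com/seguinanto10/aoc2k22 | day2/day2.py | get_my_score
-- ===== SOURCE A (Python) =====
-- def get_my_score(choices):
--     score = 0
--     for choice in choices:
--         if choice == 'X':
--             score = score + 1
--         elif choice == 'Y':
--             score = score + 2
--         elif choice == 'Z':
--             score = score + 3
--     return score
-- ===== SOURCE B (Python) =====
-- def get_my_score(choices):
--     # Divide and conquer: score of a list = score of its halves; a single
--     # choice is scored by a table lookup (unknown strings score 0).
--     if not choices:
--         return 0
--     if len(choices) == 1:
--         return {'X': 1, 'Y': 2, 'Z': 3}.get(choices[0], 0)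
--     mid = len(choices) // 2
--     return get_my_score(choices[:mid]) + get_my_score(choices[mid:])
-- ===== Notes on version B (the rewrite author's own statement) =====
-- stated objective: alternative
-- what changed: Replaces the single linear pass with an if/elif accumulator by a divide-and-conquer recursion: split the list in half, score each half recursively, add; a singleton is scored by a table lookup. Correct because the score is a sum over elements, hence additive under concatenation.
import Mathlib
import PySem

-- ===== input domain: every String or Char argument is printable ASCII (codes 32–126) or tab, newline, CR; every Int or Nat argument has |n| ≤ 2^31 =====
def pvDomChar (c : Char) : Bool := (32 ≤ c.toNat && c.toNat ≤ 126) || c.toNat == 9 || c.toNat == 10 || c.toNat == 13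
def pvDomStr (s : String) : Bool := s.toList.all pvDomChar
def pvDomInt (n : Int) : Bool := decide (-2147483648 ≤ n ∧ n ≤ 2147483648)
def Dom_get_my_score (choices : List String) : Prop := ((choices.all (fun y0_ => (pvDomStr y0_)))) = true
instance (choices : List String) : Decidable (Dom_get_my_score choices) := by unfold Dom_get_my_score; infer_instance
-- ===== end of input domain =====

-- B replaces A's single linear accumulator pass by a divide-and-conquer recursion
-- (split in half, score halves, add; singleton scored by a table lookup) — objective: alternative.


-- ===== PORT A =====
def get_my_score (choices : List String) : Int :=
  choices.foldl (fun score choice =>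
    if choice == "X" then score + 1
    else if choice == "Y" then score + 2
    else if choice == "Z" then score + 3
    else score) 0

-- ===== PORT B =====
-- choices[:mid] / choices[mid:] with 0 ≤ mid ≤ len are exactly List.take / List.drop.
def get_my_score_alt (choices : List String) : Int :=
  match choices with
  | [] => 0
  | [c] => (PySem.Dict.ofList [("X", (1 : Int)), ("Y", 2), ("Z", 3)]).getD c 0
  | c0 :: c1 :: rest =>
    let l := c0 :: c1 :: rest
    let mid := l.length / 2
    get_my_score_alt (l.take mid) + get_my_score_alt (l.drop mid)
termination_by choices.length
decreasing_by
  · simp; omega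
  · simp; omega

-- ===== PRECONDITION & SPEC =====
def Spec_get_my_score (choices : List String) (out : Int) : Prop := out = get_my_score_alt choices
instance (choices : List String) (out : Int) : Decidable (Spec_get_my_score choices out) := by unfold Spec_get_my_score; infer_instance

-- ===== CLAIM (what is proved, stated in full; the proofs are below) =====
def Claim_equal_get_my_score : Prop := ∀ (choices : List String), Dom_get_my_score choices → Spec_get_my_score choices (get_my_score choices)

-- ===== LEMMAS AND PROOFS =====
theorem get_my_score_shift (choices : List String) (s : Int) :
    choices.foldl (fun score choice =>
      if choice == "X" then score + 1
      else if choice == "Y" then score + 2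
      else if choice == "Z" then score + 3
      else score) s
    = s + get_my_score choices := by
  induction choices generalizing s with
  | nil => simp [get_my_score]
  | cons x xs ih =>
    simp only [get_my_score, List.foldl_cons]
    rw [ih, ih]
    split_ifs <;> ring

theorem get_my_score_append (l1 l2 : List String) :
    get_my_score (l1 ++ l2) = get_my_score l1 + get_my_score l2 := by
  unfold get_my_score
  rw [List.foldl_append, get_my_score_shift]
  rfl

theorem get_my_score_alt_eq (choices : List String) :
    get_my_score_alt choices = get_my_score choices := by
  match choices with
  | [] => simp [get_my_score_alt, get_my_score]
  | [c] =>
    simp only [get_my_score_alt, get_my_score, List.foldl_cons, List.foldl_nil]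
    by_cases hx : c = "X" <;> by_cases hy : c = "Y" <;> by_cases hz : c = "Z" <;>
      simp_all [PySem.Dict.ofList, PySem.Dict.update, PySem.Dict.getD_insert, PySem.Dict.getD_empty]
  | c0 :: c1 :: rest =>
    rw [get_my_score_alt]
    have h1 := get_my_score_alt_eq ((c0 :: c1 :: rest).take ((c0 :: c1 :: rest).length / 2))
    have h2 := get_my_score_alt_eq ((c0 :: c1 :: rest).drop ((c0 :: c1 :: rest).length / 2))
    simp only [h1, h2]
    rw [← get_my_score_append, List.take_append_drop]
termination_by choices.length
decreasing_by
  · simp; omega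
  · simp; omega

-- ===== VERDICT (by name: the statement is the Claim_ definition above) =====
theorem get_my_score_spec : Claim_equal_get_my_score := by
  intro choices _
  exact (get_my_score_alt_eq choices).symm
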